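-- pv_equiv track=rewrite | github.com/phoughton/sortbits | sort_bits.py | sort_bits
-- ===== SOURCE A (Python) =====
-- def sort_bits(num_list):
--     nums_counted = {}
--     miny = 0
--     maxy = 0
--     for num in num_list:
--         if num > maxy:
--             maxy = num
--         if num < miny:
--             miny = num
--
--         ones = (str(bin(num))).count('1')
--         if ones in nums_counted:
--             nums_counted[ones].append(num)
--         else:
--             nums_counted[ones] = [num]
--
--     output_list = []
--     for key in range(miny, maxy+1):
--         if key in nums_counted:
--             output_list.extend(nums_counted[key])
--     return output_list
-- ===== SOURCE B (Python) =====
-- def sort_bits(num_list):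
--     keys = sorted({bin(num).count('1') for num in num_list})
--     return [num for key in keys for num in num_list if bin(num).count('1') == key]
-- ===== Notes on version B (the rewrite author's own statement) =====
-- stated objective: simpler
-- what changed: B replaces A's dict-with-running-min/max build plus a scan over every integer key from min(list) to max(list) by two comprehensions: the sorted set of popcounts actually present, then one filter pass per present popcount.
-- intended difference: On lists where some element's popcount exceeds max(0, max(num_list)) (only possible when such an element is negative), A silently drops those elements because its output scan stops at the list's maximum value, while B keeps every element grouped by popcount, which is the intended behaviour. — e.g. on sort_bits([-3]): A returns [], B returns [-3]
import Mathlib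
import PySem

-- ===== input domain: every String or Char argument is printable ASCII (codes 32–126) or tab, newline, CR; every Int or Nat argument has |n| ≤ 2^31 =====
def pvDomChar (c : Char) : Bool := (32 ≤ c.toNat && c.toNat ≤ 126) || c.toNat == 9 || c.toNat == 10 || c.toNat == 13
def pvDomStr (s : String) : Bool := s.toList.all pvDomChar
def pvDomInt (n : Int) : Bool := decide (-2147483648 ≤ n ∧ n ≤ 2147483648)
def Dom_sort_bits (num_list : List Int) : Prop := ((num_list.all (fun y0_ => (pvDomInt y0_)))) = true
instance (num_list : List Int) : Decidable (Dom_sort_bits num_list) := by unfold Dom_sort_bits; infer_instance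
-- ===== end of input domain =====

-- B replaces A's dict build plus scan over every integer key from min(list) to max(list) by two
-- comprehensions over the sorted set of popcounts actually present (simpler); on lists where some element's
-- popcount exceeds max(0, max(list)) A silently drops those elements, B keeps them (stated as D_ below).


-- ===== PORT A =====
-- one iteration of A's first loop, over the state (nums_counted, miny, maxy);
-- "ones = str(bin(num)).count('1')" is the number of 1-bits of |num| (the '-0b' prefix has no '1'),
-- which is exactly PySem.Int.bitCount num
def sortBitsStep (s : PySem.Dict Int (List Int) × Int × Int) (num : Int) :
    PySem.Dict Int (List Int) × Int × Int :=
  let maxy := if num > s.2.2 then num else s.2.2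
  let miny := if num < s.2.1 then num else s.2.1
  let ones : Int := (PySem.Int.bitCount num : Int)
  let d := if s.1.contains ones then s.1.modify ones [] (fun l => l ++ [num])
           else s.1.insert ones [num]
  (d, miny, maxy)

def sort_bits (num_list : List Int) : List Int :=
  let st := num_list.foldl sortBitsStep (PySem.Dict.empty, 0, 0)
  (PySem.List.pyRange st.2.1 (st.2.2 + 1) 1).foldl
    (fun acc key => if st.1.contains key then acc ++ st.1.getD key [] else acc) []

-- ===== PORT B =====
def sort_bits_alt (num_list : List Int) : List Int :=
  let keys := PySem.List.sorted
    (PySem.Set.ofList (num_list.map (fun num => (PySem.Int.bitCount num : Int)))) (fun k => k)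
  keys.flatMap (fun key => num_list.filter (fun num => decide ((PySem.Int.bitCount num : Int) = key)))

-- ===== PRECONDITION & SPEC =====
-- On lists where some element's popcount exceeds max(0, max(num_list)) (only possible for a negative
-- element), A silently drops those elements because its output scan stops at the list's maximum value,
-- while B keeps every element grouped by popcount, which is the intended behaviour.
def D_sort_bits (num_list : List Int) : Prop :=
  ∃ x ∈ num_list, 0 < (PySem.Int.bitCount x : Int) ∧
    ∀ y ∈ num_list, y < (PySem.Int.bitCount x : Int)
instance (num_list : List Int) : Decidable (D_sort_bits num_list) := by
  unfold D_sort_bits; infer_instance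

def Spec_sort_bits (num_list : List Int) (out : List Int) : Prop :=
  ¬ D_sort_bits num_list → out = sort_bits_alt num_list
instance (num_list : List Int) (out : List Int) : Decidable (Spec_sort_bits num_list out) := by
  unfold Spec_sort_bits; infer_instance

def pvDiffWitness_sort_bits : List Int := [-3]
def pvDiffWitnessOut_sort_bits : (List Int) × (List Int) := ([], [-3])

-- ===== CLAIM (what is proved, stated in full; the proofs are below) =====
def Claim_unchanged_sort_bits : Prop :=
  ∀ (num_list : List Int), Dom_sort_bits num_list → Spec_sort_bits num_list (sort_bits num_list)
def Claim_changed_sort_bits : Prop :=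
  Dom_sort_bits (pvDiffWitness_sort_bits) ∧ D_sort_bits (pvDiffWitness_sort_bits) ∧
  sort_bits (pvDiffWitness_sort_bits) = pvDiffWitnessOut_sort_bits.1 ∧
  sort_bits_alt (pvDiffWitness_sort_bits) = pvDiffWitnessOut_sort_bits.2 ∧
  pvDiffWitnessOut_sort_bits.1 ≠ pvDiffWitnessOut_sort_bits.2
def Claim_exact_sort_bits : Prop :=
  ∀ (num_list : List Int), Dom_sort_bits num_list → D_sort_bits num_list →
    sort_bits num_list ≠ sort_bits_alt num_list

-- ===== LEMMAS AND PROOFS =====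

-- the popcount key of an element, and the group of a key (in original order)
def popI (x : Int) : Int := (PySem.Int.bitCount x : Int)
def grp (nl : List Int) (k : Int) : List Int := nl.filter (fun x => decide (popI x = k))

-- invariant of A's first loop
theorem foldl_sortBitsStep (nl : List Int) (d0 : PySem.Dict Int (List Int)) (m M : Int) :
    (∀ k, (nl.foldl sortBitsStep (d0, m, M)).1.getD k [] = d0.getD k [] ++ grp nl k) ∧
    (∀ k, (nl.foldl sortBitsStep (d0, m, M)).1.contains k
            = (d0.contains k || decide (k ∈ nl.map popI))) ∧
    (nl.foldl sortBitsStep (d0, m, M)).2.1 = nl.foldl min m ∧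
    (nl.foldl sortBitsStep (d0, m, M)).2.2 = nl.foldl max M := by
  induction nl generalizing d0 m M with
  | nil => simp [grp]
  | cons x t ih =>
    have hstep : sortBitsStep (d0, m, M) x =
        ((if d0.contains (popI x) then d0.modify (popI x) [] (fun l => l ++ [x])
          else d0.insert (popI x) [x]), min m x, max M x) := by
      simp only [sortBitsStep, popI]
      refine congrArg₂ Prod.mk rfl (congrArg₂ Prod.mk ?_ ?_) <;> · split_ifs <;> omega
    have hd1 : ∀ k, (if d0.contains (popI x) then d0.modify (popI x) [] (fun l => l ++ [x])
          else d0.insert (popI x) [x]).getD k []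
        = d0.getD k [] ++ (if decide (popI x = k) then [x] else []) := by
      intro k
      by_cases hc : d0.contains (popI x) = true
      · simp only [hc, if_true, PySem.Dict.getD_modify]
        by_cases hk : k = popI x
        · simp [hk]
        · simp [hk, Ne.symm hk]
      · simp only [Bool.not_eq_true] at hc
        simp only [hc, Bool.false_eq_true, if_false, PySem.Dict.getD_insert]
        by_cases hk : k = popI x
        · simp [hk, PySem.Dict.getD_of_not_contains d0 _ hc]
        · simp [hk, Ne.symm hk]
    have hd1c : ∀ k, (if d0.contains (popI x) then d0.modify (popI x) [] (fun l => l ++ [x])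
          else d0.insert (popI x) [x]).contains k = (k == popI x || d0.contains k) := by
      intro k
      by_cases hc : d0.contains (popI x) = true
      · simp [hc, PySem.Dict.contains_modify]
      · simp only [Bool.not_eq_true] at hc
        simp [hc, PySem.Dict.contains_insert]
    obtain ⟨ihg, ihc, ihm, ihM⟩ := ih (if d0.contains (popI x) then d0.modify (popI x) [] (fun l => l ++ [x])
          else d0.insert (popI x) [x]) (min m x) (max M x)
    refine ⟨?_, ?_, ?_, ?_⟩
    · intro k
      rw [List.foldl_cons, hstep, ihg, hd1]
      by_cases hk : popI x = k <;> simp [grp, hk]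
    · intro k
      rw [List.foldl_cons, hstep, ihc, hd1c]
      simp only [List.map_cons, List.mem_cons, Bool.decide_or]
      by_cases hk : k = popI x <;>
        simp [hk, Bool.or_comm, Bool.or_assoc]
    · rw [List.foldl_cons, hstep, ihm]; simp [Int.min_def]
    · rw [List.foldl_cons, hstep, ihM]; simp [Int.max_def]

-- a conditional extend-loop body is a flatMap over the filtered keys
theorem flatMap_ite_eq_filter_flatMap (L : List Int) (p : Int → Bool) (f : Int → List Int) :
    (L.flatMap (fun k => if p k then f k else [])) = (L.filter p).flatMap f := by
  induction L with
  | nil => rfl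
  | cons a L ih =>
    by_cases h : p a = true <;> simp [h, ih]

-- characterization of A
theorem sort_bits_eq (nl : List Int) :
    sort_bits nl =
      ((PySem.List.pyRange (nl.foldl min 0) (nl.foldl max 0 + 1)).filter
        (fun k => decide (k ∈ nl.map popI))).flatMap (grp nl) := by
  obtain ⟨hg, hc, hm, hM⟩ := foldl_sortBitsStep nl PySem.Dict.empty 0 0
  unfold sort_bits
  rw [PySem.List.foldl_congr_mem _ _
    (fun acc key => acc ++ (if decide (key ∈ nl.map popI) = true then grp nl key else [])) _ ?_]
  · rw [PySem.List.foldl_append_eq_flatMap, hm, hM, flatMap_ite_eq_filter_flatMap]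
    rfl
  · intro acc key _
    rw [hc, PySem.Dict.contains_empty, Bool.false_or, hg, PySem.Dict.getD_empty, List.nil_append]
    by_cases h : key ∈ nl.map popI <;> simp [h]

-- characterization of B
theorem sort_bits_alt_eq (nl : List Int) :
    sort_bits_alt nl =
      (PySem.List.sorted (PySem.Set.ofList (nl.map popI)) (fun k => k)).flatMap (grp nl) := rfl

theorem countP_mem_cons (nl : List Int) (k : Int) (S : List Int) (hk : k ∉ S) :
    nl.countP (fun x => decide (popI x ∈ k :: S))
      = nl.countP (fun x => decide (popI x = k)) + nl.countP (fun x => decide (popI x ∈ S)) := by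
  induction nl with
  | nil => rfl
  | cons y t ih =>
    have ih' : List.countP (fun x => decide (popI x = k) || decide (popI x ∈ S)) t
        = List.countP (fun x => decide (popI x = k)) t
          + List.countP (fun x => decide (popI x ∈ S)) t := by
      simpa only [List.mem_cons, Bool.decide_or] using ih
    simp only [List.countP_cons, List.mem_cons, Bool.decide_or, ih']
    by_cases hy : popI y = k
    · simp [hy, hk]; omega
    · by_cases hS : popI y ∈ S <;> simp [hy, hS] <;> omega

-- length of a flatMap of groups over a nodup key list
theorem length_flatMap_grp (nl : List Int) (S : List Int) (hS : S.Nodup) :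
    ((S.flatMap (grp nl)).length : Nat) = nl.countP (fun x => decide (popI x ∈ S)) := by
  induction S with
  | nil => simp
  | cons k S ih =>
    rw [List.nodup_cons] at hS
    rw [List.flatMap_cons, List.length_append, ih hS.2, countP_mem_cons nl k S hS.1]
    simp [grp, List.countP_eq_length_filter]

-- ===== VERDICT (by name: the statement is the Claim_ definition above) =====
theorem sort_bits_spec : Claim_unchanged_sort_bits := by
  intro nl _ hD
  rw [sort_bits_eq, sort_bits_alt_eq]
  congr 1
  refine (PySem.List.sorted_eq_of_perm_of_pairwise_lt _ _ _ ?_ ?_).symm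
  · rw [List.perm_ext_iff_of_nodup
      ((PySem.List.nodup_pyRange_one _ _).filter _) (PySem.Set.nodup_ofList _)]
    intro a
    rw [List.mem_filter, PySem.Set.mem_ofList, PySem.List.mem_pyRange_one, decide_eq_true_iff]
    constructor
    · exact fun h => h.2
    · intro ha
      refine ⟨⟨?_, ?_⟩, ha⟩
      · obtain ⟨x, _, hx⟩ := List.mem_map.mp ha
        calc nl.foldl min 0 ≤ 0 := (PySem.List.foldl_min_le nl 0).1
          _ ≤ a := hx ▸ Int.natCast_nonneg _
      · obtain ⟨x, hxm, hx⟩ := List.mem_map.mp ha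
        have hmax := PySem.List.le_foldl_max nl 0
        by_cases hp : 0 < popI x
        · have : ¬ (0 < popI x ∧ ∀ y ∈ nl, y < popI x) := fun h => hD ⟨x, hxm, h⟩
          push Not at this
          obtain ⟨y, hy, hyl⟩ := this hp
          have := hmax.2 y hy
          subst hx; unfold popI at *; omega
        · have := hmax.1
          subst hx; unfold popI at *; omega
  · exact ((PySem.List.pairwise_lt_pyRange_one _ _).filter _)

theorem sort_bits_changed : Claim_changed_sort_bits := by
  unfold Claim_changed_sort_bits; decide

theorem sort_bits_tight : Claim_exact_sort_bits := by
  intro nl _ hD heq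
  obtain ⟨x0, hx0, hpos, hall⟩ := hD
  have hmaxlt : nl.foldl max 0 < popI x0 := by
    rcases PySem.List.foldl_max_mem nl 0 with h | h
    · rw [h]; exact hpos
    · exact hall _ h
  have hlen := congrArg List.length heq
  rw [sort_bits_eq, sort_bits_alt_eq] at hlen
  rw [length_flatMap_grp nl _ ((PySem.List.nodup_pyRange_one _ _).filter _),
      length_flatMap_grp nl _
        ((PySem.List.sorted_perm _ _ _).nodup_iff.mpr (PySem.Set.nodup_ofList _))] at hlen
  have hB : nl.countP (fun x => decide (popI x ∈
      PySem.List.sorted (PySem.Set.ofList (nl.map popI)) (fun k => k))) = nl.length := by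
    rw [List.countP_eq_length]
    intro x hx
    rw [decide_eq_true_iff, (PySem.List.sorted_perm _ _ _).mem_iff, PySem.Set.mem_ofList]
    exact List.mem_map_of_mem hx
  have hnotin : popI x0 ∉ (PySem.List.pyRange (nl.foldl min 0) (nl.foldl max 0 + 1)).filter
      (fun k => decide (k ∈ nl.map popI)) := by
    intro hmem
    have := (List.mem_filter.mp hmem).1
    rw [PySem.List.mem_pyRange_one] at this
    omega
  have hA : nl.countP (fun x => decide (popI x ∈
      (PySem.List.pyRange (nl.foldl min 0) (nl.foldl max 0 + 1)).filter
        (fun k => decide (k ∈ nl.map popI)))) < nl.length := by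
    rcases Nat.lt_or_ge (nl.countP _) nl.length with h | h
    · exact h
    · exfalso
      have hle := List.countP_le_length (p := fun x => decide (popI x ∈
        (PySem.List.pyRange (nl.foldl min 0) (nl.foldl max 0 + 1)).filter
          (fun k => decide (k ∈ nl.map popI)))) (l := nl)
      have heqlen : nl.countP _ = nl.length := le_antisymm hle h
      have := (List.countP_eq_length.mp heqlen) x0 hx0
      rw [decide_eq_true_iff] at this
      exact hnotin this
  omega
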